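-- pv_equiv track=rewrite | github.com/sachin628/python-100-code | code35.py | convert0to1
-- ===== SOURCE A (Python) =====
-- def reverseThenumber(temp):
--     ans = 0
--     while (temp >0):
--         rem = temp % 10
--         ans = ans * 10 +rem
--         temp = temp // 10
--
--     return ans
--
-- def convert0to1(num):
--     if(num == 0 ):
--         return 5
--     else:
--         temp = 0
--         while(num > 0) :
--             digit  = num % 10
--             if (digit == 0 ):
--                 digit  = 1
--             temp = temp *10 + digit
--             num = num // 10
--         return reverseThenumber(temp)
-- ===== SOURCE B (Python) =====
-- def _rep(n):
--     if n <= 0: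
--         return 0
--     d = n % 10
--     return _rep(n // 10) * 10 + (d if d != 0 else 1)
--
-- def convert0to1(num):
--     if num == 0:
--         return 5
--     return _rep(num)
-- ===== Notes on version B (the rewrite author's own statement) =====
-- stated objective: simpler
-- what changed: A extracts digits into a reversed accumulator number and then runs a second digit loop to reverse it back; B replaces zero digits in one direct structural recursion over num//10, needing no reversal pass (and its base case n<=0 -> 0 naturally yields A's 0 on negatives).
import Mathlib
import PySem

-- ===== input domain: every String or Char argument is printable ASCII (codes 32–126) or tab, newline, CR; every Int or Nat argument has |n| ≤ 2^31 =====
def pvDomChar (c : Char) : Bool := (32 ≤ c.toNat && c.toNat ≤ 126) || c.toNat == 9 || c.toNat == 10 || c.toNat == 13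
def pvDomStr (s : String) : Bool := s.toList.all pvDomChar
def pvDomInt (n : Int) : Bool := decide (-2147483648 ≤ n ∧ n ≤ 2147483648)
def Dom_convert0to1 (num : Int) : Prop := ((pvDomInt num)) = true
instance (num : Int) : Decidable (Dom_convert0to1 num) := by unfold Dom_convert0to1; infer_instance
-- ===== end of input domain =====

-- B replaces A's two digit loops (build reversed, then reverse back) by one direct recursion; objective: simpler.

-- ===== PORT A =====
-- while (temp > 0): rem = temp % 10; ans = ans*10 + rem; temp = temp // 10
def revLoop (temp ans : Int) : Int :=
  if h : temp > 0 then
    revLoop (PySem.Int.floordiv temp 10) (ans * 10 + PySem.Int.mod temp 10)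
  else ans
termination_by temp.toNat
decreasing_by
  simp only [PySem.Int.floordiv_eq_ediv_of_pos (by norm_num : (0:Int) < 10)]; omega

def reverseThenumber (temp : Int) : Int := revLoop temp 0

-- while (num > 0): digit = num % 10; if digit == 0: digit = 1; temp = temp*10 + digit; num = num // 10
def convLoop (num temp : Int) : Int :=
  if h : num > 0 then
    convLoop (PySem.Int.floordiv num 10)
      (temp * 10 +
        (if PySem.Int.mod num 10 = 0 then 1 else PySem.Int.mod num 10))
  else temp
termination_by num.toNat
decreasing_by
  simp only [PySem.Int.floordiv_eq_ediv_of_pos (by norm_num : (0:Int) < 10)]; omega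

def convert0to1 (num : Int) : Int :=
  if num = 0 then 5 else reverseThenumber (convLoop num 0)

-- ===== PORT B =====
-- def _rep(n): if n <= 0: return 0; d = n % 10; return _rep(n // 10)*10 + (d if d != 0 else 1)
def repB (n : Int) : Int :=
  if h : n ≤ 0 then 0
  else
    repB (PySem.Int.floordiv n 10) * 10 +
      (if PySem.Int.mod n 10 ≠ 0 then PySem.Int.mod n 10 else 1)
termination_by n.toNat
decreasing_by
  simp only [PySem.Int.floordiv_eq_ediv_of_pos (by norm_num : (0:Int) < 10)]; omega

def convert0to1_alt (num : Int) : Int :=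
  if num = 0 then 5 else repB num

-- ===== PRECONDITION & SPEC =====
def Spec_convert0to1 (num : Int) (out : Int) : Prop := out = convert0to1_alt num
instance (num : Int) (out : Int) : Decidable (Spec_convert0to1 num out) := by unfold Spec_convert0to1; infer_instance

-- ===== CLAIM (what is proved, stated in full; the proofs are below) =====
def Claim_equal_convert0to1 : Prop := ∀ (num : Int), Dom_convert0to1 num → Spec_convert0to1 num (convert0to1 num)

-- ===== LEMMAS AND PROOFS =====

-- the digit-accumulator step shared by both programs
def pvPush (a d : Int) : Int := a * 10 + d

-- the zero-replaced digits of n, least significant first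
def rdigits (n : Int) : List Int :=
  if h : 0 < n then
    (if PySem.Int.mod n 10 = 0 then 1 else PySem.Int.mod n 10) :: rdigits (PySem.Int.floordiv n 10)
  else []
termination_by n.toNat
decreasing_by
  simp only [PySem.Int.floordiv_eq_ediv_of_pos (by norm_num : (0:Int) < 10)]; omega

theorem rdigits_bounds (n : Int) : ∀ d ∈ rdigits n, 1 ≤ d ∧ d ≤ 9 := by
  fun_induction rdigits n with
  | case1 n h ih =>
    intro d hd
    rcases List.mem_cons.mp hd with h' | h'
    · subst h'
      have h0 := PySem.Int.mod_nonneg n (b := 10) (by norm_num)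
      have h1 := PySem.Int.mod_lt n (b := 10) (by norm_num)
      split_ifs with hz
      · omega
      · omega
    · exact ih d h'
  | case2 n h => intro d hd; simp at hd

theorem convLoop_eq_foldl (n t : Int) : convLoop n t = (rdigits n).foldl pvPush t := by
  fun_induction convLoop n t with
  | case1 n t h ih =>
    rw [rdigits]
    simp only [dif_pos h, List.foldl_cons]
    exact ih
  | case2 n t h =>
    rw [rdigits]
    simp only [dif_neg h, List.foldl_nil]

theorem foldl_push_nonneg (ds : List Int) (t : Int) (ht : 0 ≤ t)
    (hds : ∀ d ∈ ds, 1 ≤ d ∧ d ≤ 9) : 0 ≤ ds.foldl pvPush t := by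
  induction ds generalizing t with
  | nil => simpa using ht
  | cons d ds ih =>
    simp only [List.foldl_cons]
    have := hds d (List.mem_cons_self ..)
    exact ih (t * 10 + d) (by omega)
      (fun d' hd' => hds d' (List.mem_cons_of_mem _ hd'))

theorem revLoop_zero (a : Int) : revLoop 0 a = a := by
  rw [revLoop]; simp

theorem revLoop_foldl (ds : List Int) (t a : Int) (ht : 0 ≤ t)
    (hds : ∀ d ∈ ds, 1 ≤ d ∧ d ≤ 9) :
    revLoop (ds.foldl pvPush t) a = revLoop t (ds.reverse.foldl pvPush a) := by
  induction ds using List.reverseRecOn generalizing a with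
  | nil => simp
  | append_singleton ds d ih =>
    have hd : 1 ≤ d ∧ d ≤ 9 := hds d (by simp)
    have hds' : ∀ d' ∈ ds, 1 ≤ d' ∧ d' ≤ 9 := fun d' hd' => hds d' (by simp [hd'])
    have hT : 0 ≤ ds.foldl pvPush t := foldl_push_nonneg ds t ht hds'
    set T := ds.foldl pvPush t with hTdef
    have hstep : (ds ++ [d]).foldl pvPush t = T * 10 + d := by
      rw [hTdef]; simp [List.foldl_append, pvPush]
    rw [hstep, revLoop]
    have hpos : T * 10 + d > 0 := by omega
    rw [dif_pos hpos]
    have hdiv : PySem.Int.floordiv (T * 10 + d) 10 = T := by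
      rw [PySem.Int.floordiv_eq_ediv_of_pos (by norm_num : (0:Int) < 10)]; omega
    have hmod : PySem.Int.mod (T * 10 + d) 10 = d := by
      rw [PySem.Int.mod_eq_emod_of_pos (by norm_num : (0:Int) < 10)]; omega
    rw [hdiv, hmod, ih (a * 10 + d) hds']
    simp [pvPush]

theorem repB_eq_foldl (n : Int) : repB n = (rdigits n).reverse.foldl pvPush 0 := by
  fun_induction repB n with
  | case1 n h =>
    rw [rdigits]
    simp only [dif_neg (by omega : ¬ 0 < n), List.reverse_nil, List.foldl_nil]
  | case2 n h ih =>
    rw [rdigits]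
    simp only [dif_pos (by omega : (0:Int) < n), List.reverse_cons, List.foldl_append,
      List.foldl_cons, List.foldl_nil, ih, pvPush]
    split_ifs with h1 h2 <;> omega

theorem main_eq (num : Int) : convert0to1 num = convert0to1_alt num := by
  unfold convert0to1 convert0to1_alt
  split_ifs with h0
  · rfl
  · by_cases hneg : num ≤ 0
    · rw [convLoop, dif_neg (by omega : ¬ num > 0)]
      rw [reverseThenumber, revLoop_zero, repB, dif_pos hneg]
    · rw [reverseThenumber, convLoop_eq_foldl, repB_eq_foldl,
        revLoop_foldl (rdigits num) 0 0 le_rfl (rdigits_bounds num), revLoop_zero]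

-- ===== VERDICT (by name: the statement is the Claim_ definition above) =====
theorem convert0to1_spec : Claim_equal_convert0to1 := by
  intro num _
  unfold Spec_convert0to1
  exact main_eq num
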